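-- pv_equiv track=rewrite | github.com/Larsluph/larsmod | larsmod/utilities.py | strfill
-- ===== SOURCE A (Python) =====
-- from typing import Any, Iterable, Union
--
-- def strfill(string: Any, length: int, fill: str = " ", before: bool = False):
--     "same as zfill but more customizable"
--     sub = str()
--     if not(isinstance(string, str)):
--         string = repr(string)
--     assert isinstance(string, str)
--     length = length - len(string)
--
--     i = 0
--     while len(sub) < length:
--         sub += fill[i % len(fill)]
--         i += 1
--
--     if before:
--         string = sub + string
--     else:
--         string = string + sub
--
--     return string
-- ===== SOURCE B (Python) =====
-- def strfill(string, length, fill=" ", before=False):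
--     "same as zfill but more customizable"
--     if not isinstance(string, str):
--         string = repr(string)
--     length = length - len(string)
--     sub = (fill * (length // len(fill) + 1))[:length] if length > 0 else ""
--     return sub + string if before else string + sub
-- ===== Notes on version B (the rewrite author's own statement) =====
-- stated objective: idiomatic
-- what changed: The character-by-character while-loop that builds the pad is replaced by a closed-form string multiplication fill * (length//len(fill)+1) sliced to the needed length.
import Mathlib
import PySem

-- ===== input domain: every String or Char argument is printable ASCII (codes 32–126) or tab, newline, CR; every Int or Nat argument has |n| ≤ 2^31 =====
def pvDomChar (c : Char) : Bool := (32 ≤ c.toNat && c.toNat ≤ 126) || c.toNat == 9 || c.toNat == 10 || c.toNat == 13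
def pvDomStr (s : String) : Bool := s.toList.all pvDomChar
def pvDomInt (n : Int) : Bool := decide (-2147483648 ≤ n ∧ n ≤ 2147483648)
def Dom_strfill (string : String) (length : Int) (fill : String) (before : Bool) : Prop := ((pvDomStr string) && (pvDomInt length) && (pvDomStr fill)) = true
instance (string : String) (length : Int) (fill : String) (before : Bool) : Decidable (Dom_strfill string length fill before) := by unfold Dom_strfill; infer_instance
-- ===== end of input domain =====

-- B replaces A's char-by-char pad-building while-loop with a closed-form
-- multiply-and-slice of the fill pattern (more idiomatic; same cost class).


-- ===== PORT A =====
-- the while-loop: while len(sub) < L: sub += fill[i % len(fill)]; i += 1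
-- (fill[i % len(fill)] ported with getD; Pre_ excludes the empty-fill case where Python raises)
def strfillLoop (fill : List Char) (L : Int) (sub : List Char) (i : Nat) : List Char :=
  if _h : (sub.length : Int) < L then
    strfillLoop fill L (sub ++ [fill.getD (i % fill.length) ' ']) (i + 1)
  else sub
termination_by (L - sub.length).toNat
decreasing_by simp; omega

def strfill (string : String) (length : Int) (fill : String) (before : Bool) : String :=
  -- 'string' is typed str here, so the isinstance/repr branch never fires
  let L : Int := length - string.toList.length
  let sub := strfillLoop fill.toList L [] 0
  if before then String.ofList (sub ++ string.toList) else String.ofList (string.toList ++ sub)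

-- ===== PORT B =====
def strfill_alt (string : String) (length : Int) (fill : String) (before : Bool) : String :=
  let L : Int := length - string.toList.length
  -- sub = (fill * (L // len(fill) + 1))[:L] if L > 0 else ""
  let sub : List Char :=
    if L > 0 then
      ((List.replicate (PySem.Int.floordiv L fill.toList.length + 1).toNat fill.toList).flatten).take L.toNat
    else []
  if before then String.ofList (sub ++ string.toList) else String.ofList (string.toList ++ sub)

-- ===== PRECONDITION & SPEC =====
-- Pre_ excludes exactly the inputs where Python A raises ZeroDivisionError:
-- fill == "" while a positive amount of padding is needed.
def Pre_strfill (string : String) (length : Int) (fill : String) (before : Bool) : Prop :=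
  length ≤ (string.toList.length : Int) ∨ fill ≠ ""
instance (string : String) (length : Int) (fill : String) (before : Bool) : Decidable (Pre_strfill string length fill before) := by unfold Pre_strfill; infer_instance

def pvWitness_strfill : String × Int × String × Bool := ("ab", 7, "xy", true)

def Spec_strfill (string : String) (length : Int) (fill : String) (before : Bool) (out : String) : Prop := out = strfill_alt string length fill before
instance (string : String) (length : Int) (fill : String) (before : Bool) (out : String) : Decidable (Spec_strfill string length fill before out) := by unfold Spec_strfill; infer_instance

-- ===== CLAIM (what is proved, stated in full; the proofs are below) =====
def Claim_equal_strfill : Prop := ∀ (string : String) (length : Int) (fill : String) (before : Bool), Dom_strfill string length fill before → Pre_strfill string length fill before → Spec_strfill string length fill before (strfill string length fill before)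

-- ===== LEMMAS AND PROOFS =====

-- the padding A's loop produces, written as a map over indices
def cycFrom (fill : List Char) (i : Nat) (k : Nat) : List Char :=
  (List.range k).map (fun j => fill.getD ((i + j) % fill.length) ' ')

theorem cycFrom_succ (fill : List Char) (i k : Nat) :
    cycFrom fill i (k + 1) = fill.getD (i % fill.length) ' ' :: cycFrom fill (i + 1) k := by
  simp [cycFrom, List.range_succ_eq_map, List.map_map, Function.comp]
  intro a _
  have : i + (a + 1) = i + 1 + a := by omega
  rw [this]

theorem strfillLoop_eq (fill : List Char) (L : Int) :
    ∀ k sub i, (L - sub.length).toNat = k →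
      strfillLoop fill L sub i = sub ++ cycFrom fill i k := by
  intro k
  induction k with
  | zero =>
      intro sub i h
      rw [strfillLoop]
      simp only [cycFrom, List.range_zero, List.map_nil, List.append_nil]
      rw [dif_neg (by omega)]
  | succ k ih =>
      intro sub i h
      rw [strfillLoop, dif_pos (by omega)]
      rw [ih (sub ++ [fill.getD (i % fill.length) ' ']) (i + 1) (by simp; omega)]
      rw [cycFrom_succ]
      simp

theorem flatten_replicate_getD (l : List Char) (hl : l ≠ []) :
    ∀ (m j : Nat), j < m * l.length →
      (List.replicate m l).flatten.getD j ' ' = l.getD (j % l.length) ' ' := by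
  intro m
  induction m with
  | zero => intro j h; omega
  | succ m ih =>
      intro j h
      rw [Nat.succ_mul] at h
      simp only [List.replicate_succ, List.flatten_cons]
      by_cases hj : j < l.length
      · rw [List.getD_append _ _ _ _ hj, Nat.mod_eq_of_lt hj]
      · have hlen : 0 < l.length := List.length_pos_of_ne_nil hl
        rw [List.getD_append_right _ _ _ _ (by omega)]
        rw [ih (j - l.length) (by omega)]
        congr 1
        exact (Nat.mod_eq_sub_mod (by omega)).symm

theorem take_flatten_replicate (l : List Char) (hl : l ≠ []) (m n : Nat)
    (h : n ≤ m * l.length) :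
    (List.replicate m l).flatten.take n = cycFrom l 0 n := by
  have hflen : (List.replicate m l).flatten.length = m * l.length := by
    simp [List.length_flatten]
  apply List.ext_getElem
  · simp [hflen, cycFrom]; omega
  · intro j h1 h2
    have hjn : j < n := by simp [hflen] at h1; omega
    have hjf : j < (List.replicate m l).flatten.length := by rw [hflen]; omega
    have key := flatten_replicate_getD l hl m j (by omega)
    simp only [List.getD, List.getElem?_eq_getElem hjf, Option.getD_some] at key
    simp only [List.getElem_take, cycFrom, List.getElem_map, List.getElem_range]
    rw [key]
    simp

theorem sub_eq (fill : List Char) (L : Int) (hpre : L ≤ 0 ∨ fill ≠ []) :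
    strfillLoop fill L [] 0 =
      (if L > 0 then
        ((List.replicate (PySem.Int.floordiv L fill.length + 1).toNat fill).flatten).take L.toNat
       else []) := by
  by_cases hL : L > 0
  · have hfill : fill ≠ [] := by rcases hpre with h | h; omega; exact h
    have hlen : 0 < fill.length := List.length_pos_of_ne_nil hfill
    rw [if_pos hL]
    rw [strfillLoop_eq fill L L.toNat [] 0 (by simp)]
    rw [take_flatten_replicate fill hfill _ _ ?_]
    · simp
    · -- L.toNat ≤ (L // len + 1).toNat * len
      have h1 : PySem.Int.floordiv L fill.length * fill.length + PySem.Int.mod L fill.length = L :=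
        PySem.Int.floordiv_mul_add_mod L fill.length
      have h2 : PySem.Int.mod L (fill.length : Int) < fill.length :=
        PySem.Int.mod_lt _ (by exact_mod_cast hlen)
      have h3 : (0:Int) ≤ PySem.Int.mod L fill.length :=
        PySem.Int.mod_nonneg _ (by exact_mod_cast hlen)
      have h4 : (0:Int) ≤ PySem.Int.floordiv L fill.length + 1 := by nlinarith
      have h5 : ((PySem.Int.floordiv L (fill.length : Int) + 1).toNat : Int)
          = PySem.Int.floordiv L fill.length + 1 := Int.toNat_of_nonneg h4
      have h6 : ((L.toNat : Nat) : Int) = L := Int.toNat_of_nonneg (by omega)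
      zify
      rw [h5, h6]
      nlinarith
  · rw [if_neg hL]
    rw [strfillLoop_eq fill L 0 [] 0 (by omega)]
    simp [cycFrom]

-- ===== VERDICT (by name: the statement is the Claim_ definition above) =====
theorem strfill_spec : Claim_equal_strfill := by
  intro string length fill before _hdom hpre
  show _ = _
  simp only [strfill, strfill_alt]
  have : strfillLoop fill.toList (length - string.toList.length) [] 0 =
      (if length - (string.toList.length : Int) > 0 then
        ((List.replicate (PySem.Int.floordiv (length - string.toList.length) fill.toList.length + 1).toNat fill.toList).flatten).take (length - (string.toList.length : Int)).toNat
       else []) := by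
    apply sub_eq
    unfold Pre_strfill at hpre
    rcases hpre with h | h
    · left; omega
    · right
      intro hc
      apply h
      have h0 : fill.toList = "".toList := by simpa using hc
      exact String.toList_inj.mp h0
  rw [this]
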